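-- pv_equiv track=rewrite | github.com/COIAS-program/COIAS_program_github | changempc.py | get_MPC_format_name_for_numbered_asteroids
-- ===== SOURCE A (Python) =====
-- def get_MPC_format_name_for_numbered_asteroids(ast_num):
--     ast_num_int = int(ast_num)
--     nameFragmentList = ['0','1','2','3','4','5','6','7','8','9','A','B','C','D','E','F','G','H','I','J','K','L','M','N','O','P','Q','R','S','T','U','V','W','X','Y','Z','a','b','c','d','e','f','g','h','i','j','k','l','m','n','o','p','q','r','s','t','u','v','w','x','y','z']
--     ################ over 620000 ####################
--     if ast_num_int >= 620000:
--         diff = ast_num_int - 620000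
--         modList = []
--         for i in range(4):
--             modList.append(diff%62)
--             diff = diff//62
--         name = "~" + nameFragmentList[modList[3]] + nameFragmentList[modList[2]] + nameFragmentList[modList[1]] + nameFragmentList[modList[0]]
--     ################ any other ######################
--     else:
--         num = ast_num_int
--         modList = []
--         for i in range(4):
--             modList.append(num%10)
--             num = num//10
--         modList.append(num%62)
--         name = nameFragmentList[modList[4]] + nameFragmentList[modList[3]] + nameFragmentList[modList[2]] + nameFragmentList[modList[1]] + nameFragmentList[modList[0]]
--
--     return name
-- ===== SOURCE B (Python) =====
-- _A62 = "0123456789ABCDEFGHIJKLMNOPQRSTUVWXYZabcdefghijklmnopqrstuvwxyz"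
--
-- def _to_base(x, b, k):
--     """k fixed-width digits of x in base b, most significant first, by recursion."""
--     if k == 0:
--         return ""
--     return _to_base(x // b, b, k - 1) + _A62[x % b]
--
-- def get_MPC_format_name_for_numbered_asteroids(ast_num):
--     n = int(ast_num)
--     if n >= 620000:
--         return "~" + _to_base(n - 620000, 62, 4)
--     return _to_base(n // 10000, 62, 1) + _to_base(n % 10000, 10, 4)
-- ===== Notes on version B (the rewrite author's own statement) =====
-- stated objective: simpler
-- what changed: A runs a stateful divmod loop that collects remainders into a modList and then concatenates five/four explicit indexed lookups; B has no loop and no list at all: one small recursive helper _to_base(x, b, k) emits a fixed-width most-significant-first numeral directly, and both branches become a single call (base 62 width 4 after the '~', or a width-1 base-62 lead plus a width-4 decimal tail).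
import Mathlib
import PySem

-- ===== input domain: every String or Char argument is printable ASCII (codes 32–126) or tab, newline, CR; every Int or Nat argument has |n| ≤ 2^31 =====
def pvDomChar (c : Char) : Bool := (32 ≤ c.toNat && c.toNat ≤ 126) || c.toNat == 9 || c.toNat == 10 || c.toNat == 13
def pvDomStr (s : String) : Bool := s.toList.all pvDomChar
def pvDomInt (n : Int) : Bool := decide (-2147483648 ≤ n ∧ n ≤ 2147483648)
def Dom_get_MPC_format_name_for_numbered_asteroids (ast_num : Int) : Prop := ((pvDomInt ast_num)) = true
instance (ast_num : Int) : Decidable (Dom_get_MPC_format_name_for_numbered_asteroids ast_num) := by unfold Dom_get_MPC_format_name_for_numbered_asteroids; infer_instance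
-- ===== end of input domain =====

-- B replaces A's divmod loop + modList + indexed concatenations by one recursive
-- fixed-width numeral emitter _to_base(x, b, k); objective: simpler.

-- ===== PORT A =====
-- Python: nameFragmentList, a list of 62 one-character strings
def pvFrag : List String :=
  ["0","1","2","3","4","5","6","7","8","9","A","B","C","D","E","F","G","H","I","J",
   "K","L","M","N","O","P","Q","R","S","T","U","V","W","X","Y","Z","a","b","c","d",
   "e","f","g","h","i","j","k","l","m","n","o","p","q","r","s","t","u","v","w","x","y","z"]

def get_MPC_format_name_for_numbered_asteroids (ast_num : Int) : String :=
  let ast_num_int := ast_num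
  if ast_num_int ≥ 620000 then
    -- for i in range(4): modList.append(diff%62); diff = diff//62
    let st := (List.range 4).foldl
      (fun (st : Int × List Int) _ =>
        (PySem.Int.floordiv st.1 62, st.2 ++ [PySem.Int.mod st.1 62]))
      (ast_num_int - 620000, [])
    let modList := st.2
    "~" ++ (PySem.List.pyGetD pvFrag (PySem.List.pyGetD modList 3 0) "")
        ++ (PySem.List.pyGetD pvFrag (PySem.List.pyGetD modList 2 0) "")
        ++ (PySem.List.pyGetD pvFrag (PySem.List.pyGetD modList 1 0) "")
        ++ (PySem.List.pyGetD pvFrag (PySem.List.pyGetD modList 0 0) "")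
  else
    -- for i in range(4): modList.append(num%10); num = num//10  ;  modList.append(num%62)
    let st := (List.range 4).foldl
      (fun (st : Int × List Int) _ =>
        (PySem.Int.floordiv st.1 10, st.2 ++ [PySem.Int.mod st.1 10]))
      (ast_num_int, [])
    let modList := st.2 ++ [PySem.Int.mod st.1 62]
    (PySem.List.pyGetD pvFrag (PySem.List.pyGetD modList 4 0) "")
        ++ (PySem.List.pyGetD pvFrag (PySem.List.pyGetD modList 3 0) "")
        ++ (PySem.List.pyGetD pvFrag (PySem.List.pyGetD modList 2 0) "")
        ++ (PySem.List.pyGetD pvFrag (PySem.List.pyGetD modList 1 0) "")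
        ++ (PySem.List.pyGetD pvFrag (PySem.List.pyGetD modList 0 0) "")

-- ===== PORT B =====
def pvA62 : String := "0123456789ABCDEFGHIJKLMNOPQRSTUVWXYZabcdefghijklmnopqrstuvwxyz"

-- _A62[k] for an in-range index k (one code point)
def pvChar (k : Int) : Char := (PySem.Str.pyGet? pvA62 k).getD ' '

-- _to_base(x, b, k): k fixed-width digits of x in base b, most significant first, by recursion
def pvToBase (x b : Int) : Nat → String
  | 0 => ""
  | k + 1 => pvToBase (PySem.Int.floordiv x b) b k ++ String.ofList [pvChar (PySem.Int.mod x b)]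

def get_MPC_format_name_for_numbered_asteroids_alt (ast_num : Int) : String :=
  let n := ast_num
  if n ≥ 620000 then
    "~" ++ pvToBase (n - 620000) 62 4
  else
    pvToBase (PySem.Int.floordiv n 10000) 62 1 ++ pvToBase (PySem.Int.mod n 10000) 10 4

-- ===== PRECONDITION & SPEC =====
def Spec_get_MPC_format_name_for_numbered_asteroids (ast_num : Int) (out : String) : Prop := out = get_MPC_format_name_for_numbered_asteroids_alt ast_num
instance (ast_num : Int) (out : String) : Decidable (Spec_get_MPC_format_name_for_numbered_asteroids ast_num out) := by unfold Spec_get_MPC_format_name_for_numbered_asteroids; infer_instance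

-- ===== CLAIM (what is proved, stated in full; the proofs are below) =====
def Claim_equal_get_MPC_format_name_for_numbered_asteroids : Prop := ∀ (ast_num : Int), Dom_get_MPC_format_name_for_numbered_asteroids ast_num → Spec_get_MPC_format_name_for_numbered_asteroids ast_num (get_MPC_format_name_for_numbered_asteroids ast_num)

-- ===== LEMMAS AND PROOFS =====

-- A's singleton fragment string at an in-range index, as code points, is B's character
lemma pv_frag_toList (k : Int) (h0 : 0 ≤ k) (h1 : k < 62) :
    (PySem.List.pyGetD pvFrag k "").toList = [pvChar k] := by
  interval_cases k <;> decide

lemma pv_frag_mod62 (x : Int) :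
    (PySem.List.pyGetD pvFrag (x % 62) "").toList = [pvChar (x % 62)] :=
  pv_frag_toList _ (Int.emod_nonneg _ (by norm_num)) (Int.emod_lt_of_pos _ (by norm_num))

lemma pv_frag_mod10 (x : Int) :
    (PySem.List.pyGetD pvFrag (x % 10) "").toList = [pvChar (x % 10)] :=
  pv_frag_toList _ (Int.emod_nonneg _ (by norm_num))
    (lt_trans (Int.emod_lt_of_pos _ (by norm_num)) (by norm_num))

-- Python floor-division/mod by a nonnegative divisor, in ediv/emod form
lemma pv_fd (a b : Int) (hb : 0 ≤ b) : PySem.Int.floordiv a b = a / b := by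
  simp [PySem.Int.floordiv, Int.fdiv_eq_ediv, hb]

lemma pv_md (a b : Int) (hb : 0 ≤ b) : PySem.Int.mod a b = a % b := by
  simp [PySem.Int.mod, Int.fmod_eq_emod, hb]

-- reading modList back at the literal Python indices
lemma pv_getD3 (a b c d : Int) : PySem.List.pyGetD [a,b,c,d] 3 0 = d := by
  simp [PySem.List.pyGetD, PySem.List.pyGet?, PySem.List.pyIdx?]

lemma pv_getD2 (a b c d : Int) : PySem.List.pyGetD [a,b,c,d] 2 0 = c := by
  simp [PySem.List.pyGetD, PySem.List.pyGet?, PySem.List.pyIdx?]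

lemma pv_getD1 (a b c d : Int) : PySem.List.pyGetD [a,b,c,d] 1 0 = b := by
  simp [PySem.List.pyGetD, PySem.List.pyGet?, PySem.List.pyIdx?]

lemma pv_getD5_4 (a b c d e : Int) : PySem.List.pyGetD [a,b,c,d,e] 4 0 = e := by
  simp [PySem.List.pyGetD, PySem.List.pyGet?, PySem.List.pyIdx?]

lemma pv_getD5_3 (a b c d e : Int) : PySem.List.pyGetD [a,b,c,d,e] 3 0 = d := by
  simp [PySem.List.pyGetD, PySem.List.pyGet?, PySem.List.pyIdx?]

lemma pv_getD5_2 (a b c d e : Int) : PySem.List.pyGetD [a,b,c,d,e] 2 0 = c := by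
  simp [PySem.List.pyGetD, PySem.List.pyGet?, PySem.List.pyIdx?]

lemma pv_getD5_1 (a b c d e : Int) : PySem.List.pyGetD [a,b,c,d,e] 1 0 = b := by
  simp [PySem.List.pyGetD, PySem.List.pyGet?, PySem.List.pyIdx?]

lemma pv_getD5_0 (a b c d e : Int) : PySem.List.pyGetD [a,b,c,d,e] 0 0 = a := by
  simp [PySem.List.pyGetD, PySem.List.pyGet?, PySem.List.pyIdx?]

set_option maxRecDepth 4000 in
set_option maxHeartbeats 1600000 in
lemma pv_main (n : Int) :
    get_MPC_format_name_for_numbered_asteroids n = get_MPC_format_name_for_numbered_asteroids_alt n := by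
  by_cases h : n ≥ 620000
  · rw [get_MPC_format_name_for_numbered_asteroids, get_MPC_format_name_for_numbered_asteroids_alt]
    simp only [h, if_pos]
    simp only [show List.range 4 = [0,1,2,3] from rfl, List.foldl, pvToBase,
      pv_fd _ _ (by norm_num : (0 : Int) ≤ 62), pv_md _ _ (by norm_num : (0 : Int) ≤ 62)]
    apply String.toList_injective
    simp [pv_getD3, pv_getD2, pv_getD1, pv_frag_mod62]
  · rw [get_MPC_format_name_for_numbered_asteroids, get_MPC_format_name_for_numbered_asteroids_alt]
    simp only [h, if_false]
    simp only [show List.range 4 = [0,1,2,3] from rfl, List.foldl, pvToBase,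
      pv_fd _ _ (by norm_num : (0 : Int) ≤ 10), pv_md _ _ (by norm_num : (0 : Int) ≤ 10),
      pv_md _ _ (by norm_num : (0 : Int) ≤ 62), pv_md _ _ (by norm_num : (0 : Int) ≤ 10000),
      pv_fd _ _ (by norm_num : (0 : Int) ≤ 10000)]
    have e4 : n / 10 / 10 / 10 / 10 % 62 = n / 10000 % 62 := by omega
    have e3 : n / 10 / 10 / 10 % 10 = n % 10000 / 10 / 10 / 10 % 10 := by omega
    have e2 : n / 10 / 10 % 10 = n % 10000 / 10 / 10 % 10 := by omega
    have e1 : n / 10 % 10 = n % 10000 / 10 % 10 := by omega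
    have e0 : n % 10 = n % 10000 % 10 := by omega
    simp only [List.nil_append, List.cons_append,
      pv_getD5_4, pv_getD5_3, pv_getD5_2, pv_getD5_1, pv_getD5_0]
    simp only [e4, e3, e2, e1, e0]
    apply String.toList_injective
    simp [pv_frag_mod62, pv_frag_mod10]

-- ===== VERDICT (by name: the statement is the Claim_ definition above) =====
theorem get_MPC_format_name_for_numbered_asteroids_spec : Claim_equal_get_MPC_format_name_for_numbered_asteroids := by
  intro n _
  exact pv_main n
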